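-- pv_equiv track=rewrite | github.com/nathants/s4 | s4/cli.py | _parse_glob
-- ===== SOURCE A (Python) =====
-- def _parse_glob(indir):
--     if '*' in indir:
--         base = []
--         pattern = []
--         switch = False
--         for part in indir.split('/'):
--             if '*' in part:
--                 switch = True
--             if switch:
--                 pattern.append(part)
--             else:
--                 base.append(part)
--         indir = '/'.join(base) + '/'
--         glob = '/'.join(pattern)
--     else:
--         glob = None
--     return indir, glob
-- ===== SOURCE B (Python) =====
-- def _parse_glob(indir):
--     if '*' not in indir:
--         return indir, None
--     cut = 0  # index just past the last '/' that precedes the first '*'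
--     for i, c in enumerate(indir):
--         if c == '*':
--             break
--         if c == '/':
--             cut = i + 1
--     if cut == 0:
--         return '/', indir
--     return indir[:cut], indir[cut:]
-- ===== Notes on version B (the rewrite author's own statement) =====
-- stated objective: idiomatic
-- what changed: Replaces A's split('/')-then-flag-fold-then-'/'.join reassembly with a single character scan that finds the index just past the last '/' before the first '*' and returns two slices of the original string.
import Mathlib
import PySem

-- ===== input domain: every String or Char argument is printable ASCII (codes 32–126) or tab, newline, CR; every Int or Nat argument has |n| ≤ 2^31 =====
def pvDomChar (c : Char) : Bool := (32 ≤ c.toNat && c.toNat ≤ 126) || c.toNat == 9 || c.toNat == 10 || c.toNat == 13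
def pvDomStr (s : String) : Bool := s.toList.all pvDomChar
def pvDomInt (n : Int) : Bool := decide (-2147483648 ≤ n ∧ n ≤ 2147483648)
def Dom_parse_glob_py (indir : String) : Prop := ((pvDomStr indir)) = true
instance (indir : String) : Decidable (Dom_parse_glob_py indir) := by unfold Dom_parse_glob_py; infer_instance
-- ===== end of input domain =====

-- B replaces A's split('/') + flag-fold + '/'.join reassembly by one character scan and two slices (idiomatic, same cost).

-- ===== PORT A =====
-- loop body of A's 'for part in indir.split('/')': state (base, pattern, switch)
def pvStepA (st : List (List Char) × List (List Char) × Bool) (part : List Char) :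
    List (List Char) × List (List Char) × Bool :=
  let switch := if PySem.Chars.isIn ['*'] part then true else st.2.2
  if switch then (st.1, st.2.1 ++ [part], switch) else (st.1 ++ [part], st.2.1, switch)

def parse_glob_py (indir : String) : String × Option String :=
  if PySem.Str.isIn "*" indir then
    let st := (PySem.Chars.splitOn indir.toList ['/']).foldl pvStepA ([], [], false)
    (String.ofList (PySem.Chars.join ['/'] st.1 ++ ['/']),
     some (String.ofList (PySem.Chars.join ['/'] st.2.1)))
  else (indir, none)

-- ===== PORT B =====
-- Source B's 'for i, c in enumerate(indir)' loop with its break at '*'; cut := i+1 at each '/'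
def pvScanGo : List Char → Nat → Nat → Nat
  | [], _, cut => cut
  | c :: rest, i, cut =>
    if c = '*' then cut
    else if c = '/' then pvScanGo rest (i + 1) (i + 1)
    else pvScanGo rest (i + 1) cut

def parse_glob_py_alt (indir : String) : String × Option String :=
  if PySem.Str.isIn "*" indir then
    let cut := pvScanGo indir.toList 0 0
    if cut = 0 then ("/", some indir)
    -- indir[:cut] / indir[cut:] with 0 ≤ cut ≤ len(indir) are exactly take/drop
    else (String.ofList (indir.toList.take cut), some (String.ofList (indir.toList.drop cut)))
  else (indir, none)

-- ===== PRECONDITION & SPEC =====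
def Spec_parse_glob_py (indir : String) (out : String × Option String) : Prop := out = parse_glob_py_alt indir
instance (indir : String) (out : String × Option String) : Decidable (Spec_parse_glob_py indir out) := by unfold Spec_parse_glob_py; infer_instance

-- ===== CLAIM (what is proved, stated in full; the proofs are below) =====
def Claim_equal_parse_glob_py : Prop := ∀ (indir : String), Dom_parse_glob_py indir → Spec_parse_glob_py indir (parse_glob_py indir)

-- ===== LEMMAS AND PROOFS =====

-- prepend chars onto the first piece (the accumulator shape of splitOn.go)
def pvConsHead (xs : List Char) : List (List Char) → List (List Char)
  | [] => [xs]
  | p :: ps => (xs ++ p) :: ps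

-- structural form of indir.split('/')
def pvSplit1 : List Char → List (List Char)
  | [] => [[]]
  | c :: rest => if c = '/' then [] :: pvSplit1 rest else pvConsHead [c] (pvSplit1 rest)

-- structural form of Source B's cut: index just past the last '/' before the first '*' (0 if none)
def pvScanCut : List Char → Nat
  | [] => 0
  | c :: rest =>
    if c = '*' then 0
    else if c = '/' then pvScanCut rest + 1
    else if pvScanCut rest = 0 then 0 else pvScanCut rest + 1

-- A keeps a part in `base` iff this holds
def pvNoStar (p : List Char) : Bool := !PySem.Chars.isIn ['*'] p

theorem pvIsIn_singleton (c : Char) (l : List Char) :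
    PySem.Chars.isIn [c] l = true ↔ c ∈ l := by
  rw [PySem.Chars.isIn_iff_infix]
  constructor
  · intro hinf; exact hinf.subset (List.mem_singleton_self c)
  · intro hm
    obtain ⟨s, t, rfl⟩ := List.append_of_mem hm
    exact ⟨s, t, by simp⟩

theorem pvSplit1_ne_nil (cs : List Char) : pvSplit1 cs ≠ [] := by
  cases cs with
  | nil => simp [pvSplit1]
  | cons c rest =>
    simp only [pvSplit1]
    split
    · simp
    · cases h : pvSplit1 rest <;> simp [pvConsHead]

theorem pvConsHead_nil (ps : List (List Char)) (h : ps ≠ []) : pvConsHead [] ps = ps := by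
  cases ps with
  | nil => exact absurd rfl h
  | cons p ps => simp [pvConsHead]

theorem pvConsHead_consHead (a b : List Char) (ps : List (List Char)) :
    pvConsHead a (pvConsHead b ps) = pvConsHead (a ++ b) ps := by
  cases ps <;> simp [pvConsHead]

theorem pvSplitOn_go_spec (fuel : Nat) (l cur : List Char) (acc : List (List Char))
    (h : l.length ≤ fuel) :
    PySem.Chars.splitOn.go ['/'] fuel l cur acc = acc.reverse ++ pvConsHead cur.reverse (pvSplit1 l) := by
  induction fuel generalizing l cur acc with
  | zero =>
    have hl : l = [] := List.eq_nil_of_length_eq_zero (Nat.le_zero.mp h)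
    subst hl
    simp [PySem.Chars.splitOn.go, pvSplit1, pvConsHead]
  | succ n ihn =>
    cases l with
    | nil => simp [PySem.Chars.splitOn.go, pvSplit1, pvConsHead]
    | cons c rest =>
      simp only [List.length_cons] at h
      rw [PySem.Chars.splitOn.go]
      by_cases hc : c = '/'
      · subst hc
        have hpre : List.isPrefixOf ['/'] ('/' :: rest) = true := by
          rw [List.isPrefixOf_iff_prefix]; exact ⟨rest, rfl⟩
        rw [if_pos hpre]
        have hdrop : List.drop (['/'] : List Char).length ('/' :: rest) = rest := rfl
        rw [hdrop, ihn _ _ _ (by omega)]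
        simp only [pvSplit1, if_pos rfl, List.reverse_cons, List.reverse_nil]
        rw [pvConsHead_nil _ (pvSplit1_ne_nil rest)]
        simp [pvConsHead]
      · have hpre : ¬ (List.isPrefixOf ['/'] (c :: rest) = true) := by
          rw [List.isPrefixOf_iff_prefix]
          rintro ⟨t, ht⟩
          injection ht with h1 _
          exact hc h1.symm
        rw [if_neg hpre]
        rw [ihn _ _ _ (by omega)]
        simp only [pvSplit1, if_neg hc, List.reverse_cons]
        rw [pvConsHead_consHead]

theorem pvSplitOn_eq (cs : List Char) : PySem.Chars.splitOn cs ['/'] = pvSplit1 cs := by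
  show PySem.Chars.splitOn.go ['/'] (cs.length + 1) cs [] [] = pvSplit1 cs
  rw [pvSplitOn_go_spec _ _ _ _ (by omega)]
  simp only [List.reverse_nil, List.nil_append]
  exact pvConsHead_nil _ (pvSplit1_ne_nil cs)

theorem pvJoin_consHead (c : Char) (p : List Char) (ps : List (List Char)) :
    PySem.Chars.join ['/'] ((c :: p) :: ps) = c :: PySem.Chars.join ['/'] (p :: ps) := by
  cases ps with
  | nil => simp [PySem.Chars.join_singleton]
  | cons q qs => simp [PySem.Chars.join_cons_cons]

theorem pvJoin_split1 (cs : List Char) : PySem.Chars.join ['/'] (pvSplit1 cs) = cs := by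
  induction cs with
  | nil => simp [pvSplit1, PySem.Chars.join_singleton]
  | cons c rest ih =>
    simp only [pvSplit1]
    cases heq : pvSplit1 rest with
    | nil => exact absurd heq (pvSplit1_ne_nil rest)
    | cons p ps =>
      rw [heq] at ih
      by_cases hc : c = '/'
      · subst hc
        rw [if_pos rfl, PySem.Chars.join_cons_cons, ih]
        simp
      · rw [if_neg hc]
        show PySem.Chars.join ['/'] (pvConsHead [c] (p :: ps)) = c :: rest
        simp only [pvConsHead, List.singleton_append]
        rw [pvJoin_consHead, ih]

theorem pvScanGo_eq (cs : List Char) : ∀ (i cut : Nat),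
    pvScanGo cs i cut = if pvScanCut cs = 0 then cut else i + pvScanCut cs := by
  induction cs with
  | nil => intro i cut; simp [pvScanGo, pvScanCut]
  | cons c rest ih =>
    intro i cut
    by_cases h1 : c = '*'
    · simp [pvScanGo, pvScanCut, h1]
    · by_cases h2 : c = '/'
      · simp only [pvScanGo, pvScanCut, if_neg h1, if_pos h2, ih]
        by_cases hr : pvScanCut rest = 0 <;> simp [hr] <;> omega
      · simp only [pvScanGo, pvScanCut, if_neg h1, if_neg h2, ih]
        by_cases hr : pvScanCut rest = 0 <;> simp [hr] <;> omega

theorem pvFoldA_true (ps : List (List Char)) : ∀ (base pat : List (List Char)),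
    ps.foldl pvStepA (base, pat, true) = (base, pat ++ ps, true) := by
  induction ps with
  | nil => intro base pat; simp
  | cons p tl ih =>
    intro base pat
    have hstep : pvStepA (base, pat, true) p = (base, pat ++ [p], true) := by
      simp [pvStepA]
    rw [List.foldl_cons, hstep, ih]
    simp

theorem pvFoldA_false (ps : List (List Char)) : ∀ (base pat : List (List Char)),
    ps.foldl pvStepA (base, pat, false) =
      (base ++ ps.takeWhile pvNoStar, pat ++ ps.dropWhile pvNoStar, !(ps.dropWhile pvNoStar).isEmpty) := by
  induction ps with
  | nil => intro base pat; simp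
  | cons p tl ih =>
    intro base pat
    by_cases hp : PySem.Chars.isIn ['*'] p = true
    · have hstep : pvStepA (base, pat, false) p = (base, pat ++ [p], true) := by
        simp [pvStepA, hp]
      rw [List.foldl_cons, hstep, pvFoldA_true]
      simp [pvNoStar, List.takeWhile_cons, List.dropWhile_cons, hp]
    · have hp' : PySem.Chars.isIn ['*'] p = false := by simpa using hp
      have hstep : pvStepA (base, pat, false) p = (base ++ [p], pat, false) := by
        simp [pvStepA, hp']
      rw [List.foldl_cons, hstep, ih]
      simp [pvNoStar, List.takeWhile_cons, List.dropWhile_cons, hp']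

-- the heart: A's split of the parts at the first starred part = B's two slices at pvScanCut
theorem pvMain (cs : List Char) (h : PySem.Chars.isIn ['*'] cs = true) :
    (pvScanCut cs = 0 → (pvSplit1 cs).takeWhile pvNoStar = []) ∧
    (pvScanCut cs ≠ 0 →
      (pvSplit1 cs).takeWhile pvNoStar ≠ [] ∧
      PySem.Chars.join ['/'] ((pvSplit1 cs).takeWhile pvNoStar) ++ ['/'] = cs.take (pvScanCut cs) ∧
      PySem.Chars.join ['/'] ((pvSplit1 cs).dropWhile pvNoStar) = cs.drop (pvScanCut cs)) := by
  induction cs with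
  | nil =>
    rw [pvIsIn_singleton] at h
    simp at h
  | cons c rest ih =>
    rw [pvIsIn_singleton] at h
    obtain ⟨p, ps, heq⟩ : ∃ p ps, pvSplit1 rest = p :: ps := by
      cases hsp : pvSplit1 rest with
      | nil => exact absurd hsp (pvSplit1_ne_nil rest)
      | cons a as => exact ⟨a, as, rfl⟩
    by_cases hc : c = '*'
    · subst hc
      have hsplit : pvSplit1 ('*' :: rest) = ('*' :: p) :: ps := by
        simp [pvSplit1, heq, pvConsHead]
      have hscan : pvScanCut ('*' :: rest) = 0 := by
        simp [pvScanCut]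
      constructor
      · intro _
        rw [hsplit]
        have hns : pvNoStar ('*' :: p) = false := by
          have : PySem.Chars.isIn ['*'] ('*' :: p) = true :=
            (pvIsIn_singleton _ _).mpr List.mem_cons_self
          simp [pvNoStar, this]
        simp [List.takeWhile_cons, hns]
      · intro h0; exact absurd hscan h0
    · have hmr : '*' ∈ rest := by
        cases List.mem_cons.mp h with
        | inl hh => exact absurd hh.symm hc
        | inr hh => exact hh
      have ihh := ih ((pvIsIn_singleton '*' rest).mpr hmr)
      by_cases hs : c = '/'
      · subst hs
        have hsplit : pvSplit1 ('/' :: rest) = [] :: pvSplit1 rest := by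
          simp [pvSplit1]
        have hscan : pvScanCut ('/' :: rest) = pvScanCut rest + 1 := by
          simp [pvScanCut]
        have hnsnil : pvNoStar ([] : List Char) = true := by decide
        have hTW : (([] : List Char) :: pvSplit1 rest).takeWhile pvNoStar
            = [] :: (pvSplit1 rest).takeWhile pvNoStar := by
          simp [List.takeWhile_cons, hnsnil]
        have hDW : (([] : List Char) :: pvSplit1 rest).dropWhile pvNoStar
            = (pvSplit1 rest).dropWhile pvNoStar := by
          simp [List.dropWhile_cons, hnsnil]
        constructor
        · intro h0; rw [hscan] at h0; omega
        · intro _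
          rw [hsplit, hscan, hTW, hDW]
          refine ⟨by simp, ?_, ?_⟩
          · by_cases h0 : pvScanCut rest = 0
            · rw [ihh.1 h0, h0]
              simp [PySem.Chars.join_singleton, List.take_succ_cons]
            · obtain ⟨hne, htake, hdrop⟩ := ihh.2 h0
              cases htw : (pvSplit1 rest).takeWhile pvNoStar with
              | nil => exact absurd htw hne
              | cons q qs =>
                rw [htw] at htake
                rw [PySem.Chars.join_cons_cons, List.take_succ_cons]
                simp only [List.nil_append, List.singleton_append, List.cons_append]
                rw [htake]
          · rw [List.drop_succ_cons]
            by_cases h0 : pvScanCut rest = 0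
            · rw [h0]
              have h1 := ihh.1 h0
              have h2 : (pvSplit1 rest).dropWhile pvNoStar = pvSplit1 rest := by
                have h3 := List.takeWhile_append_dropWhile (p := pvNoStar) (l := pvSplit1 rest)
                rw [h1] at h3; simpa using h3
              rw [h2, pvJoin_split1, List.drop_zero]
            · exact (ihh.2 h0).2.2
      · have hsplit : pvSplit1 (c :: rest) = (c :: p) :: ps := by
          simp only [pvSplit1, if_neg hs]
          rw [heq]; simp [pvConsHead]
        by_cases h0 : pvScanCut rest = 0
        · have hscan : pvScanCut (c :: rest) = 0 := by
            simp only [pvScanCut, if_neg hc, if_neg hs, if_pos h0]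
          constructor
          · intro _
            have h1 := ihh.1 h0
            rw [heq] at h1
            have hpstar : pvNoStar p = false := by
              by_contra hcon
              have hptrue : pvNoStar p = true := by simpa using hcon
              simp [List.takeWhile_cons, hptrue] at h1
            have hpisin : PySem.Chars.isIn ['*'] p = true := by
              simpa [pvNoStar] using hpstar
            have hpmem : '*' ∈ p := (pvIsIn_singleton '*' p).mp hpisin
            have hcp : pvNoStar (c :: p) = false := by
              have : PySem.Chars.isIn ['*'] (c :: p) = true :=
                (pvIsIn_singleton _ _).mpr (List.mem_cons_of_mem c hpmem)
              simp [pvNoStar, this]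
            rw [hsplit]
            simp [List.takeWhile_cons, hcp]
          · intro hcon; exact absurd hscan hcon
        · have hscan : pvScanCut (c :: rest) = pvScanCut rest + 1 := by
            simp only [pvScanCut, if_neg hc, if_neg hs, if_neg h0]
          obtain ⟨hne, htake, hdrop⟩ := ihh.2 h0
          rw [heq] at hne htake hdrop
          have hps : pvNoStar p = true := by
            by_contra hcon
            have hpf : pvNoStar p = false := by simpa using hcon
            simp [List.takeWhile_cons, hpf] at hne
          have hpnostar : '*' ∉ p := by
            intro hm
            have := (pvIsIn_singleton '*' p).mpr hm
            simp [pvNoStar, this] at hps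
          have hcp : pvNoStar (c :: p) = true := by
            have hfalse : PySem.Chars.isIn ['*'] (c :: p) = false := by
              rw [Bool.eq_false_iff]
              intro ht
              cases List.mem_cons.mp ((pvIsIn_singleton _ _).mp ht) with
              | inl hh => exact hc hh.symm
              | inr hh => exact hpnostar hh
            simp [pvNoStar, hfalse]
          have hTW : ((c :: p) :: ps).takeWhile pvNoStar = (c :: p) :: ps.takeWhile pvNoStar := by
            simp [List.takeWhile_cons, hcp]
          have hTW2 : (p :: ps).takeWhile pvNoStar = p :: ps.takeWhile pvNoStar := by
            simp [List.takeWhile_cons, hps]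
          rw [hTW2] at htake
          constructor
          · intro h00; rw [hscan] at h00; omega
          · intro _
            rw [hsplit, hscan]
            refine ⟨by rw [hTW]; simp, ?_, ?_⟩
            · rw [hTW, pvJoin_consHead, List.take_succ_cons]
              simp only [List.cons_append]
              rw [htake]
            · have hDW : ((c :: p) :: ps).dropWhile pvNoStar = ps.dropWhile pvNoStar := by
                simp [List.dropWhile_cons, hcp]
              have hDW2 : (p :: ps).dropWhile pvNoStar = ps.dropWhile pvNoStar := by
                simp [List.dropWhile_cons, hps]
              rw [hDW, ← hDW2, List.drop_succ_cons]
              exact hdrop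

-- ===== VERDICT (by name: the statement is the Claim_ definition above) =====
theorem parse_glob_py_spec : Claim_equal_parse_glob_py := by
  intro indir _
  unfold Spec_parse_glob_py parse_glob_py parse_glob_py_alt
  by_cases h : PySem.Str.isIn "*" indir = true
  · rw [if_pos h, if_pos h]
    have hc : PySem.Chars.isIn ['*'] indir.toList = true := by
      simpa [PySem.Str.isIn] using h
    obtain ⟨H0, H1⟩ := pvMain indir.toList hc
    simp only [pvSplitOn_eq, pvFoldA_false, List.nil_append, pvScanGo_eq, Nat.zero_add]
    by_cases h0 : pvScanCut indir.toList = 0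
    · rw [if_pos h0, if_pos rfl]
      have hTW := H0 h0
      have hDW : (pvSplit1 indir.toList).dropWhile pvNoStar = pvSplit1 indir.toList := by
        have h3 := List.takeWhile_append_dropWhile (p := pvNoStar) (l := pvSplit1 indir.toList)
        rw [hTW] at h3; simpa using h3
      rw [hTW, hDW, pvJoin_split1]
      simp only [PySem.Chars.join_nil, List.nil_append, Prod.mk.injEq, Option.some.injEq]
      exact ⟨by decide, by simp⟩
    · rw [if_neg h0, if_neg h0]
      obtain ⟨hne, htake, hdrop⟩ := H1 h0
      simp only [Prod.mk.injEq, Option.some.injEq]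
      exact ⟨congrArg String.ofList htake, congrArg String.ofList hdrop⟩
  · rw [if_neg h, if_neg h]
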